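-- pv_equiv track=rewrite | github.com/TouKaienn/ECNR | tools.py | one_bit_decode
-- ===== SOURCE A (Python) =====
-- def one_bit_decode(byte,length):
--     """decode one bit from byte
--     """
--     left_over = length%8
--     bits = ''.join(format(b, f'08b') for b in byte)
--     if left_over:
--         ls = [int(bits[i]) for i in range(len(bits)-8)]
--         left_over_bits = bits[-left_over:]
--         ls += [int(left_over_bits[i]) for i in range(len(left_over_bits))]
--     else:
--         ls = [int(bits[i]) for i in range(len(bits))]
--     return ls
-- ===== SOURCE B (Python) =====
-- def one_bit_decode(byte, length):
--     """decode one bit from byte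
--     """
--     bits = []
--     for b in byte:
--         chunk = []
--         while b > 0:
--             chunk.append(b & 1)
--             b >>= 1
--         while len(chunk) < 8:
--             chunk.append(0)
--         chunk.reverse()
--         bits += chunk
--     left_over = length % 8
--     if left_over:
--         return bits[:-8] + bits[-left_over:]
--     return bits
-- ===== Notes on version B (the rewrite author's own statement) =====
-- stated objective: alternative
-- what changed: B extracts each byte's bits arithmetically (b & 1 / b >> 1 into a padded, reversed chunk) and splices the resulting int lists, instead of A's formatting every byte into a binary string, then re-reading each character with int() via index comprehensions and a string slice.
-- outside the precondition, e.g. on one_bit_decode([-2], 5): A returns [0, 0, 0, 1, 0], B returns [0, 0, 0, 0, 0]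
import Mathlib
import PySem

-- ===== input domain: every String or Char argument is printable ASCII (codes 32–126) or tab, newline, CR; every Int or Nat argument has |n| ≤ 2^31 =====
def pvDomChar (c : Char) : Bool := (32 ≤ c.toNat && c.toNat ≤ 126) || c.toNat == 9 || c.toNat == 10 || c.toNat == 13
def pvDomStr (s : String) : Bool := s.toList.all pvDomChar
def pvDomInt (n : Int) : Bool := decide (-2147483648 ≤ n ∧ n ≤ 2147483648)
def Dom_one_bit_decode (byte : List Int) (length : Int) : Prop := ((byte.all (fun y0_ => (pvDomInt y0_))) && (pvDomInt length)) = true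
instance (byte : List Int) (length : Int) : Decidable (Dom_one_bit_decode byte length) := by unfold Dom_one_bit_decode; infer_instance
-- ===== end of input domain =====

-- B replaces A's build-a-binary-string-then-index/slice-it pipeline by direct arithmetic
-- bit extraction per byte, splicing plain lists (objective: alternative decomposition, no string formatting).

-- ===== PORT A =====

-- format(n, 'b') for 0 < n: binary digits, most significant first (exact for positive n;
-- negative elements make Python's int(bits[i]) raise ValueError and are excluded by Pre_).
def pvBinChars (n : Nat) : List Char :=
  if h : n = 0 then [] else pvBinChars (n / 2) ++ [if n % 2 = 1 then '1' else '0']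
decreasing_by exact Nat.div_lt_self (Nat.pos_of_ne_zero h) (by omega)

-- format(b, '08b') for 0 ≤ b: minimal binary representation, zero-padded on the left to width 8.
def pvFmt08b (b : Int) : List Char :=
  let s := if b.toNat = 0 then ['0'] else pvBinChars b.toNat
  List.replicate (8 - s.length) '0' ++ s

-- int(c) for a digit character c — exact on '0'..'9', the only characters pvFmt08b produces.
def pvDigitInt (c : Char) : Int := (c.toNat : Int) - 48

def one_bit_decode (byte : List Int) (length : Int) : List Int :=
  let left_over := PySem.Int.mod length 8
  let bits := (byte.map pvFmt08b).flatten
  if left_over ≠ 0 then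
    let ls := (PySem.List.pyRange 0 ((bits.length : Int) - 8)).map
      (fun i => pvDigitInt (PySem.List.pyGetD bits i '0'))
    let left_over_bits := PySem.List.slice bits (some (-left_over)) none
    ls ++ (PySem.List.pyRange 0 (left_over_bits.length : Int)).map
      (fun i => pvDigitInt (PySem.List.pyGetD left_over_bits i '0'))
  else
    (PySem.List.pyRange 0 (bits.length : Int)).map
      (fun i => pvDigitInt (PySem.List.pyGetD bits i '0'))

-- ===== PORT B =====

-- the 'while b > 0: chunk.append(b & 1); b >>= 1' loop of Source B (b & 1 = b % 2, b >> 1 = b / 2 on ℕ)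
def pvChunkOf (n : Nat) : List Int :=
  if h : n = 0 then [] else ((n % 2 : Nat) : Int) :: pvChunkOf (n / 2)
decreasing_by exact Nat.div_lt_self (Nat.pos_of_ne_zero h) (by omega)

def one_bit_decode_alt (byte : List Int) (length : Int) : List Int :=
  let bits := byte.foldl (fun acc b =>
    let chunk := pvChunkOf b.toNat           -- the while loop runs only while b > 0
    let chunk := chunk ++ List.replicate (8 - chunk.length) (0 : Int)
    acc ++ chunk.reverse) []
  let left_over := PySem.Int.mod length 8
  if left_over ≠ 0 then
    PySem.List.slice bits none (some (-8)) ++ PySem.List.slice bits (some (-left_over)) none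
  else
    bits

-- ===== PRECONDITION & SPEC =====
-- Pre_ excludes lists with a negative element (outside the natural byte domain): format renders
-- a '-' sign character and Python's int(bits[i]) raises ValueError whenever that character is
-- read; when the sign falls entirely inside the discarded middle window A still returns a value,
-- and neither behaviour on such non-bytes is one B should reproduce.
def Pre_one_bit_decode (byte : List Int) (length : Int) : Prop := ∀ b ∈ byte, 0 ≤ b
instance (byte : List Int) (length : Int) : Decidable (Pre_one_bit_decode byte length) := by unfold Pre_one_bit_decode; infer_instance

def pvWitness_one_bit_decode : List Int × Int := ([5, 255, 0], 21)

def Spec_one_bit_decode (byte : List Int) (length : Int) (out : List Int) : Prop := out = one_bit_decode_alt byte length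
instance (byte : List Int) (length : Int) (out : List Int) : Decidable (Spec_one_bit_decode byte length out) := by unfold Spec_one_bit_decode; infer_instance

-- ===== CLAIM (what is proved, stated in full; the proofs are below) =====
def Claim_equal_one_bit_decode : Prop := ∀ (byte : List Int) (length : Int), Dom_one_bit_decode byte length → Pre_one_bit_decode byte length → Spec_one_bit_decode byte length (one_bit_decode byte length)

-- ===== LEMMAS AND PROOFS =====

-- the digits of pvBinChars, read as ints, are the reversed bit chunk
theorem pvBinChars_map_digit (n : Nat) :
    (pvBinChars n).map pvDigitInt = (pvChunkOf n).reverse := by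
  fun_induction pvBinChars n with
  | case1 => simp [pvChunkOf]
  | case2 n h ih =>
    rw [pvChunkOf]
    simp only [h, dite_false, List.map_append, ih, List.reverse_cons, List.map_cons]
    congr 1
    rcases Nat.mod_two_eq_zero_or_one n with h2 | h2 <;> simp [h2, pvDigitInt]

theorem pvBinChars_length (n : Nat) :
    (pvBinChars n).length = (pvChunkOf n).length := by
  have := congrArg List.length (pvBinChars_map_digit n)
  simpa using this

-- one byte: A's eight characters, read as ints, are B's padded-and-reversed chunk
theorem pvFmt08b_map_digit (b : Int) :
    (pvFmt08b b).map pvDigitInt =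
      (pvChunkOf b.toNat ++ List.replicate (8 - (pvChunkOf b.toNat).length) (0 : Int)).reverse := by
  unfold pvFmt08b
  by_cases h : b.toNat = 0
  · simp [h, pvChunkOf, pvDigitInt]
  · simp only [h, if_false, List.map_append, List.map_replicate, pvBinChars_map_digit,
      List.reverse_append, List.reverse_replicate, pvBinChars_length]
    have h0 : pvDigitInt '0' = 0 := by decide
    rw [h0]

-- indexing a prefix of the range gives List.take (Int bound, possibly ≤ 0 or past the length)
theorem pv_map_getD_pyRange {α : Type} (xs : List α) (m : Int) (d : α) (h : m ≤ (xs.length : Int)) :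
    (PySem.List.pyRange 0 m).map (fun j => PySem.List.pyGetD xs j d) = xs.take m.toNat := by
  by_cases hm : m ≤ 0
  · have h1 : PySem.List.pyRange 0 m = [] := by
      simp [PySem.List.pyRange]; omega
    have h2 : m.toNat = 0 := by omega
    simp [h1, h2]
  · have hmle : m.toNat ≤ xs.length := by omega
    have hmn : m = ((m.toNat : Nat) : Int) := by omega
    rw [hmn, PySem.List.pyRange_zero_natCast, List.map_map]
    apply List.ext_getElem
    · simp; omega
    · intro i h1 h2
      have hi : i < m.toNat := by simpa using h1
      simp only [List.getElem_map, Function.comp_apply, List.getElem_range, List.getElem_take]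
      rw [PySem.List.pyGetD_eq_getElem xs d (by omega) (by omega)]
      simp

-- A's index comprehension over a prefix, with the digits already converted
theorem pv_map_digit_pyRange (xs : List Char) (m : Int) (h : m ≤ (xs.length : Int)) :
    (PySem.List.pyRange 0 m).map (fun i => pvDigitInt (PySem.List.pyGetD xs i '0')) =
      (xs.map pvDigitInt).take m.toNat := by
  have hc : ∀ i : Int, pvDigitInt (PySem.List.pyGetD xs i '0') =
      PySem.List.pyGetD (xs.map pvDigitInt) i (pvDigitInt '0') :=
    fun i => (PySem.List.pyGetD_map pvDigitInt xs i '0').symm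
  simp only [hc]
  exact pv_map_getD_pyRange (xs.map pvDigitInt) m _ (by simpa using h)

-- the two programs build the same flat bit list (A as characters, B as ints)
theorem pv_bits_eq (byte : List Int) :
    ((byte.map pvFmt08b).flatten).map pvDigitInt =
      byte.foldl (fun acc b =>
        acc ++ (pvChunkOf b.toNat ++ List.replicate (8 - (pvChunkOf b.toNat).length) (0 : Int)).reverse) [] := by
  have h := PySem.List.foldl_append_eq_flatMap
    (fun b : Int => (pvChunkOf b.toNat ++ List.replicate (8 - (pvChunkOf b.toNat).length) (0 : Int)).reverse)
    byte []
  rw [List.nil_append] at h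
  rw [h, List.map_flatten, List.map_map]
  unfold List.flatMap
  congr 1
  exact List.map_congr_left (fun b _ => pvFmt08b_map_digit b)

-- ===== VERDICT (by name: the statement is the Claim_ definition above) =====
theorem one_bit_decode_spec : Claim_equal_one_bit_decode := by
  intro byte length _ _
  unfold Spec_one_bit_decode one_bit_decode one_bit_decode_alt
  have hbits := pv_bits_eq byte
  set bitsA := (byte.map pvFmt08b).flatten with hA
  set bitsB := byte.foldl (fun acc b =>
      acc ++ (pvChunkOf b.toNat ++ List.replicate (8 - (pvChunkOf b.toNat).length) (0 : Int)).reverse) []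
    with hB
  have hlen : bitsA.length = bitsB.length := by
    rw [← hbits]; simp
  set lo := PySem.Int.mod length 8 with hlo
  have hlob : 0 ≤ lo ∧ lo < 8 :=
    ⟨PySem.Int.mod_nonneg length (by omega), PySem.Int.mod_lt length (by omega)⟩
  by_cases h : lo ≠ 0
  · rw [if_pos h, if_pos h]
    have hk : lo = ((lo.toNat : Nat) : Int) := by omega
    have hkpos : 0 < lo.toNat := by omega
    have hsliceA : PySem.List.slice bitsA (some (-lo)) none = bitsA.drop (bitsA.length - lo.toNat) := by
      rw [hk]; exact PySem.List.slice_from_neg_natCast bitsA lo.toNat hkpos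
    have hsliceB : PySem.List.slice bitsB (some (-lo)) none = bitsB.drop (bitsB.length - lo.toNat) := by
      rw [hk]; exact PySem.List.slice_from_neg_natCast bitsB lo.toNat hkpos
    have hslice8 : PySem.List.slice bitsB none (some (-8)) = bitsB.take (bitsB.length - 8) := by
      have h8 : ((-8 : Int)) = -((8 : Nat) : Int) := by norm_num
      rw [h8]; exact PySem.List.slice_to_neg_natCast bitsB 8 (by omega)
    have hp1 : (PySem.List.pyRange 0 ((bitsA.length : Int) - 8)).map
        (fun i => pvDigitInt (PySem.List.pyGetD bitsA i '0')) = bitsB.take (bitsB.length - 8) := by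
      rw [pv_map_digit_pyRange bitsA _ (by omega)]
      have ht : ((bitsA.length : Int) - 8).toNat = bitsA.length - 8 := by omega
      rw [ht, hbits, hlen]
    have hp2 : (PySem.List.pyRange 0 (((bitsA.drop (bitsA.length - lo.toNat)).length : Int))).map
        (fun i => pvDigitInt (PySem.List.pyGetD (bitsA.drop (bitsA.length - lo.toNat)) i '0')) =
        bitsB.drop (bitsB.length - lo.toNat) := by
      rw [pv_map_digit_pyRange _ _ (by omega), Int.toNat_natCast,
        List.take_of_length_le (by simp), List.map_drop, hbits, hlen]
    rw [hsliceA, hsliceB, hslice8]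
    simp only [hp1, hp2]
  · rw [if_neg h, if_neg h]
    rw [pv_map_digit_pyRange bitsA _ (by omega), Int.toNat_natCast,
      List.take_of_length_le (by simp)]
    exact hbits
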